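-- pv_equiv track=rewrite | github.com/kalvaakhil/problems-leetcode | STRINGS/Equal 0, 1 and 2.py | getSubstringWithEqual012
-- ===== SOURCE A (Python) =====
-- def getSubstringWithEqual012(S):
--     my_dic = {(0,0):1}
--     z_c,o_c,t_c,count = 0,0,0,0
--     for i in range(len(S)):
--         if S[i]=='0':z_c+=1
--         elif S[i]=="1":o_c+=1
--         else:t_c+=1
--         temp = (z_c - o_c , z_c - t_c)
--         if temp not in my_dic:count+=0
--         else:count+=my_dic[temp]
--         if temp in my_dic:my_dic[temp]+=1
--         else:my_dic[temp] = 1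
--     return count
-- ===== SOURCE B (Python) =====
-- def getSubstringWithEqual012(S):
--     # Brute force straight from the definition: for every suffix, scan its
--     # prefixes and count those whose 0/1/2 tallies are all equal.
--     total = 0
--     cs = S
--     while cs:
--         total += _balanced_prefixes(cs)
--         cs = cs[1:]
--     return total
--
-- def _balanced_prefixes(cs):
--     z = o = t = c = 0
--     for ch in cs:
--         if ch == '0':
--             z += 1
--         elif ch == '1':
--             o += 1
--         else:
--             t += 1
--         if z == o == t:
--             c += 1
--     return c
-- ===== Notes on version B (the rewrite author's own statement) =====
-- stated objective: alternative
-- what changed: B drops A's prefix-balance hash table entirely and counts straight from the definition: for each suffix it scans prefixes and counts those whose 0/1/2 tallies are equal, trading A's O(n) hashing for O(n^2) directness.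
import Mathlib
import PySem

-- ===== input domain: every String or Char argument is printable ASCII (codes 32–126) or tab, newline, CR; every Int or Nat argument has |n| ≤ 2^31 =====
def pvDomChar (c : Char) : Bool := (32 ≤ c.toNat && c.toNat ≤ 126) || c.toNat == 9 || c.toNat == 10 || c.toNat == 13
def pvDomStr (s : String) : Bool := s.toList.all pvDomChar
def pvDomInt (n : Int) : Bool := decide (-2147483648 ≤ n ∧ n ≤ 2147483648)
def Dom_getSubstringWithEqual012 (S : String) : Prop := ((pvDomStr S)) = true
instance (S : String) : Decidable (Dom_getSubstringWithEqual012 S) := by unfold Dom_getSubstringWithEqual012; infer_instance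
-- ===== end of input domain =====

-- B replaces A's prefix-balance hash table by the definitional brute force:
-- for every suffix, scan its prefixes and count equal 0/1/2 tallies (alternative, O(n^2)).

-- ===== PORT A =====
-- shared character step: the identical if/elif/else counter update of both Pythons
def pvBump (z o t : Int) (ch : Char) : Int × Int × Int :=
  if ch = '0' then (z + 1, o, t)
  else if ch = '1' then (z, o + 1, t)
  else (z, o, t + 1)

-- one iteration of A's loop body on the state (my_dic, z_c, o_c, t_c, count)
def pvStepA (st : PySem.Dict (Int × Int) Int × Int × Int × Int × Int) (ch : Char) :
    PySem.Dict (Int × Int) Int × Int × Int × Int × Int :=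
  match st with
  | (d, z, o, t, c) =>
    match pvBump z o t ch with
    | (z, o, t) =>
      let temp : Int × Int := (z - o, z - t)
      let c := if ¬ d.contains temp then c + 0 else c + d.getD temp 0
      let d := if d.contains temp then d.modify temp 0 (· + 1) else d.insert temp 1
      (d, z, o, t, c)

def getSubstringWithEqual012 (S : String) : Int :=
  ((PySem.List.pyRange 0 (PySem.Str.len S) 1).foldl
    (fun st i => pvStepA st (PySem.List.pyGetD S.toList i ' '))
    (PySem.Dict.ofList [((0, 0), 1)], 0, 0, 0, 0)).2.2.2.2

-- ===== PORT B =====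
-- _balanced_prefixes: the for-loop over cs with state (z, o, t, c)
def pvBPStep (st : Int × Int × Int × Int) (ch : Char) : Int × Int × Int × Int :=
  match st with
  | (z, o, t, c) =>
    match pvBump z o t ch with
    | (z, o, t) => (z, o, t, if z = o ∧ o = t then c + 1 else c)

def pvBalancedPrefixes (cs : List Char) : Int :=
  (cs.foldl pvBPStep (0, 0, 0, 0)).2.2.2

-- the 'while cs: total += _balanced_prefixes(cs); cs = cs[1:]' loop, as recursion on the suffix
def pvSuffixTotal : List Char → Int
  | [] => 0
  | ch :: rest => pvBalancedPrefixes (ch :: rest) + pvSuffixTotal rest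

def getSubstringWithEqual012_alt (S : String) : Int :=
  pvSuffixTotal S.toList

-- ===== PRECONDITION & SPEC =====
def Spec_getSubstringWithEqual012 (S : String) (out : Int) : Prop := out = getSubstringWithEqual012_alt S
instance (S : String) (out : Int) : Decidable (Spec_getSubstringWithEqual012 S out) := by unfold Spec_getSubstringWithEqual012; infer_instance

-- ===== CLAIM (what is proved, stated in full; the proofs are below) =====
def Claim_equal_getSubstringWithEqual012 : Prop := ∀ (S : String), Dom_getSubstringWithEqual012 S → Spec_getSubstringWithEqual012 S (getSubstringWithEqual012 S)

-- ===== LEMMAS AND PROOFS =====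

-- the prefix-balance keys of cs starting from counters (z, o, t)
def pvKeys (z o t : Int) : List Char → List (Int × Int)
  | [] => []
  | ch :: cs =>
    match pvBump z o t ch with
    | (z, o, t) => (z - o, z - t) :: pvKeys z o t cs

-- equal-pair count, scanning forward with the already-seen prefix as accumulator (A's shape)
def pvPairsF (seen : List (Int × Int)) : List (Int × Int) → Int
  | [] => 0
  | k :: ks => (seen.count k : Int) + pvPairsF (seen ++ [k]) ks

-- equal-pair count, each element paired with the later ones (B's shape)
def pvPairsB : List (Int × Int) → Int
  | [] => 0
  | k :: ks => (ks.count k : Int) + pvPairsB ks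

def pvCross (seen L : List (Int × Int)) : Int :=
  (L.map (fun x => (seen.count x : Int))).sum

theorem pv_indicator_sum (k : Int × Int) (L : List (Int × Int)) :
    (L.map (fun x => if k = x then (1 : Int) else 0)).sum = (L.count k : Int) := by
  induction L with
  | nil => simp
  | cons a L ih =>
    simp only [List.map_cons, List.sum_cons, ih, List.count_cons]
    by_cases h : k = a
    · subst h; simp; omega
    · have h' : ¬ a = k := fun e => h e.symm
      simp [h, h']

theorem pvPairsF_eq (L : List (Int × Int)) :
    ∀ seen, pvPairsF seen L = pvPairsB L + pvCross seen L := by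
  induction L with
  | nil => intro seen; simp [pvPairsF, pvPairsB, pvCross]
  | cons k ks ih =>
    intro seen
    have hc : pvCross (seen ++ [k]) ks = pvCross seen ks + (ks.count k : Int) := by
      unfold pvCross
      have : ∀ x : Int × Int, ((seen ++ [k]).count x : Int)
          = (seen.count x : Int) + (if k = x then (1 : Int) else 0) := by
        intro x
        by_cases h : k = x <;> simp [List.count_append, h]
      calc (ks.map fun x => ((seen ++ [k]).count x : Int)).sum
          = (ks.map fun x => (seen.count x : Int) + (if k = x then (1:Int) else 0)).sum := by
            exact congrArg _ (List.map_congr_left (fun x _ => this x))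
        _ = (ks.map fun x => (seen.count x : Int)).sum
              + (ks.map fun x => if k = x then (1:Int) else 0).sum := by
            rw [← List.sum_map_add]
        _ = (ks.map fun x => (seen.count x : Int)).sum + (ks.count k : Int) := by
            rw [pv_indicator_sum]
    have hcons : pvCross seen (k :: ks) = (seen.count k : Int) + pvCross seen ks := by
      simp [pvCross]
    simp only [pvPairsF, pvPairsB, ih, hc, hcons]
    ring

-- unfolding one step of pvKeys once the bump result is known
theorem pvKeys_cons (z o t : Int) (ch : Char) (cs : List Char) {a b c : Int}
    (h : pvBump z o t ch = (a, b, c)) :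
    pvKeys z o t (ch :: cs) = (a - b, a - c) :: pvKeys a b c cs := by
  simp only [pvKeys, h]

-- shifting the starting counters shifts every key by the same pair
theorem pvKeys_shift (cs : List Char) :
    ∀ z1 o1 t1 z2 o2 t2 : Int,
      pvKeys (z1 + z2) (o1 + o2) (t1 + t2) cs
        = (pvKeys z1 o1 t1 cs).map (fun p => (p.1 + (z2 - o2), p.2 + (z2 - t2))) := by
  induction cs with
  | nil => intro z1 o1 t1 z2 o2 t2; simp [pvKeys]
  | cons ch cs ih =>
    intro z1 o1 t1 z2 o2 t2
    rcases hb : pvBump z1 o1 t1 ch with ⟨a, b, c⟩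
    have hbump : pvBump (z1 + z2) (o1 + o2) (t1 + t2) ch = (a + z2, b + o2, c + t2) := by
      unfold pvBump at hb ⊢
      split_ifs at hb ⊢ <;>
        (rw [Prod.mk.injEq, Prod.mk.injEq] at hb ⊢) <;>
        obtain ⟨e1, e2, e3⟩ := hb <;>
        exact ⟨by omega, by omega, by omega⟩
    rw [pvKeys_cons _ _ _ _ _ hb, pvKeys_cons _ _ _ _ _ hbump, ih, List.map_cons]
    congr 1
    refine Prod.ext ?_ ?_ <;> simp <;> ring

theorem pv_count_map_shift (d : Int × Int) (k : Int × Int) (L : List (Int × Int)) :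
    (L.map (fun p => (p.1 + d.1, p.2 + d.2))).count (k.1 + d.1, k.2 + d.2) = L.count k := by
  have hinj : Function.Injective (fun p : Int × Int => (p.1 + d.1, p.2 + d.2)) := by
    intro a b hab
    rw [Prod.mk.injEq] at hab
    exact Prod.ext (by omega) (by omega)
  simpa using List.count_map_of_injective L _ hinj k

theorem pvPairsB_map_shift (d : Int × Int) (L : List (Int × Int)) :
    pvPairsB (L.map (fun p => (p.1 + d.1, p.2 + d.2))) = pvPairsB L := by
  induction L with
  | nil => simp [pvPairsB]
  | cons k ks ih => simp [pvPairsB, ih, pv_count_map_shift d k ks]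

-- B's inner loop counts the (0,0) keys (balanced prefixes)
theorem pvBP_loop (cs : List Char) :
    ∀ z o t c : Int,
      (cs.foldl pvBPStep (z, o, t, c)).2.2.2 = c + ((pvKeys z o t cs).count (0, 0) : Int) := by
  induction cs with
  | nil => intro z o t c; simp [pvKeys]
  | cons ch cs ih =>
    intro z o t c
    simp only [List.foldl_cons, pvBPStep, pvKeys]
    rcases hb : pvBump z o t ch with ⟨z', o', t'⟩
    simp only [ih, List.count_cons]
    by_cases h : z' = o' ∧ o' = t'
    · obtain ⟨h1, h2⟩ := h
      subst h1; subst h2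
      simp
      omega
    · have hk : ¬ ((z' - o', z' - t') : Int × Int) = (0, 0) := by
        intro he
        rw [Prod.mk.injEq] at he
        exact h ⟨by omega, by omega⟩
      simp [h, hk]

-- B's outer loop equals the backward pair count over (0,0) :: all prefix keys
theorem pvSuffixTotal_eq (cs : List Char) :
    pvSuffixTotal cs = pvPairsB ((0, 0) :: pvKeys 0 0 0 cs) := by
  induction cs with
  | nil => simp [pvSuffixTotal, pvPairsB, pvKeys]
  | cons ch cs ih =>
    simp only [pvSuffixTotal, pvBalancedPrefixes, pvBP_loop, ih]
    simp only [pvPairsB, pvKeys]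
    rcases hb : pvBump 0 0 0 ch with ⟨z1, o1, t1⟩
    have hshift : pvKeys z1 o1 t1 cs
        = (pvKeys 0 0 0 cs).map (fun p => (p.1 + (z1 - o1), p.2 + (z1 - t1))) := by
      simpa using pvKeys_shift cs 0 0 0 z1 o1 t1
    have hcount : (pvKeys z1 o1 t1 cs).count (z1 - o1, z1 - t1)
        = (pvKeys 0 0 0 cs).count (0, 0) := by
      rw [hshift]
      simpa using pv_count_map_shift (z1 - o1, z1 - t1) (0, 0) (pvKeys 0 0 0 cs)
    have hpairs : pvPairsB (pvKeys z1 o1 t1 cs) = pvPairsB (pvKeys 0 0 0 cs) := by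
      rw [hshift]
      simpa using pvPairsB_map_shift (z1 - o1, z1 - t1) (pvKeys 0 0 0 cs)
    rw [hcount, hpairs]
    ring

-- A's dict update (membership test, then modify-or-insert) equals a single insert
theorem pv_dict_step (d : PySem.Dict (Int × Int) Int) (k : Int × Int) :
    (if d.contains k then d.modify k 0 (· + 1) else d.insert k 1)
      = d.insert k (d.getD k 0 + 1) := by
  by_cases h : d.contains k = true
  · simp [h, PySem.Dict.modify]
  · have h' : d.contains k = false := by simpa using h
    rw [PySem.Dict.getD_of_not_contains d 0 h']
    simp [h']

-- A's count update equals adding getD (0 when absent)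
theorem pv_count_step (d : PySem.Dict (Int × Int) Int) (k : Int × Int) (c : Int) :
    (if ¬ d.contains k then c + 0 else c + d.getD k 0) = c + d.getD k 0 := by
  by_cases h : d.contains k = true
  · simp [h]
  · have h' : d.contains k = false := by simpa using h
    rw [PySem.Dict.getD_of_not_contains d 0 h']
    simp [h']

-- A's main loop: the dict is the multiset of seen keys, the count is the forward pair sum
theorem pvA_loop (cs : List Char) :
    ∀ (d : PySem.Dict (Int × Int) Int) (z o t c : Int) (seen : List (Int × Int)),
      (∀ k, d.getD k 0 = (seen.count k : Int)) →
      (cs.foldl pvStepA (d, z, o, t, c)).2.2.2.2 = c + pvPairsF seen (pvKeys z o t cs) := by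
  induction cs with
  | nil => intro d z o t c seen _; simp [pvPairsF, pvKeys]
  | cons ch cs ih =>
    intro d z o t c seen hinv
    simp only [List.foldl_cons, pvStepA, pvKeys]
    rcases hb : pvBump z o t ch with ⟨z', o', t'⟩
    rw [pv_dict_step, pv_count_step]
    have hinv' : ∀ k, (d.insert (z' - o', z' - t') (d.getD (z' - o', z' - t') 0 + 1)).getD k 0
        = ((seen ++ [(z' - o', z' - t')]).count k : Int) := by
      intro k
      rw [PySem.Dict.getD_insert]
      by_cases hk : k = (z' - o', z' - t')
      · simp [hk, List.count_append, hinv]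
      · simp [hk, List.count_append, hinv, Ne.symm hk]
    rw [ih _ z' o' t' _ (seen ++ [(z' - o', z' - t')]) hinv']
    simp only [pvPairsF, hinv]
    ring

theorem pv_seed_inv :
    ∀ k : Int × Int, (PySem.Dict.ofList ([((0, 0), 1)] : List ((Int × Int) × Int))).getD k 0
      = (([((0, 0) : Int × Int)]).count k : Int) := by
  intro k
  by_cases hk : k = ((0 : Int), (0 : Int))
  · subst hk; decide
  · simp [PySem.Dict.ofList, PySem.Dict.getD, PySem.Dict.get?, PySem.Dict.insert,
      PySem.Dict.update, PySem.Dict.empty, List.find?, Ne.symm hk]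

theorem pv_cross_seed (L : List (Int × Int)) :
    pvCross [(0, 0)] L = (L.count (0, 0) : Int) := by
  unfold pvCross
  have : ∀ x ∈ L, ((([((0,0) : Int × Int)]).count x : Int))
      = (if ((0:Int),(0:Int)) = x then (1:Int) else 0) := by
    intro x _
    by_cases h : ((0:Int),(0:Int)) = x <;> simp [h]
  rw [List.map_congr_left this, pv_indicator_sum]

-- ===== VERDICT (by name: the statement is the Claim_ definition above) =====
theorem getSubstringWithEqual012_spec : Claim_equal_getSubstringWithEqual012 := by
  intro S _
  unfold Spec_getSubstringWithEqual012 getSubstringWithEqual012 getSubstringWithEqual012_alt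
  rw [show PySem.Str.len S = (S.toList.length : Int) from rfl,
      PySem.List.foldl_pyRange_zero_pyGetD' S.toList ' ' pvStepA _]
  rw [pvA_loop S.toList _ 0 0 0 0 [(0, 0)] pv_seed_inv]
  rw [pvPairsF_eq, pv_cross_seed, pvSuffixTotal_eq]
  simp [pvPairsB]
  ring
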